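-- pv_equiv track=rewrite | github.com/shakfu/soundlab | c/euclid/euclidean.py | euclid_str
-- ===== SOURCE A (Python) =====
-- def euclid_str(pulses, steps):
--     """returns a string of ones and zeros for a given euclidean rhythm
--
--     >>> euclid_str(3, 8)
--     '10010010'
--
--     """
--     if (pulses > steps):
--         pulses = steps
--     a = "1"
--     b = "0"
--     k = pulses
--     m = steps - pulses
--     while (m > 1 and k > 1):
--         cpy = a
--         a += b
--         if k <= m:
--             m -= k
--         else:
--             b = cpy
--             tmp = k
--             k = m
--             m = tmp - m
--     rhythm = ""
--     while (k > 0):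
--         rhythm += a
--         k -= 1
--     while (m > 0):
--         rhythm += b
--         m -= 1
--     return rhythm
-- ===== SOURCE B (Python) =====
-- def euclid_str(pulses, steps):
--     """returns a string of ones and zeros for a given euclidean rhythm
--
--     >>> euclid_str(3, 8)
--     '10010010'
--     """
--     if pulses > steps:
--         pulses = steps
--
--     def descend(a, b, k, m):
--         if m > 1 and k > 1:
--             if k <= m:
--                 return descend(a + b * (m // k), b, k, m % k)
--             return descend(a + b, a, m, k - m)
--         return a * k + b * m
--
--     return descend("1", "0", pulses, steps - pulses)
-- ===== Notes on version B (the rewrite author's own statement) =====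
-- stated objective: faster
-- what changed: Replaces A's one-at-a-time subtractive loop and its character-by-character output loops with a division-based Euclidean descent (whole quotient batched via string repetition) that returns a*k + b*m directly.
import Mathlib
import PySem

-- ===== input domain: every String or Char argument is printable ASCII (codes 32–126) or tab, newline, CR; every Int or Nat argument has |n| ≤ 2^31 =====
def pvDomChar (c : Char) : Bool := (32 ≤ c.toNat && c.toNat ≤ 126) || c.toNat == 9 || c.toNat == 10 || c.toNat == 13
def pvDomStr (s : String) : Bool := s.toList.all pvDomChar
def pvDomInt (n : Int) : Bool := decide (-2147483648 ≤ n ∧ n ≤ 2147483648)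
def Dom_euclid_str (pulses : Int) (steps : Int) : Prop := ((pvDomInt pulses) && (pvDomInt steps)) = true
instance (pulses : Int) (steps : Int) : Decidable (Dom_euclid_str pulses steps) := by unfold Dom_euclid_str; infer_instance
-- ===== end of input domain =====

-- B replaces A's one-at-a-time subtractive loop and its character-by-character output loops
-- with a division-based Euclidean descent (quotient batched by string repetition): faster.

-- ===== PORT A =====
-- the 'while (m > 1 and k > 1)' loop of A, state (a, b, k, m)
def euclidLoopA (a b : String) (k m : Int) : String × String × Int × Int :=
  if h : m > 1 ∧ k > 1 then
    if k ≤ m then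
      euclidLoopA (a ++ b) b k (m - k)
    else
      euclidLoopA (a ++ b) a m (k - m)
  else (a, b, k, m)
termination_by (k + m).toNat
decreasing_by
  · omega
  · omega

-- 'while (x > 0): rhythm += s; x -= 1'
def repLoopA (rhythm s : String) (x : Int) : String :=
  if x > 0 then repLoopA (rhythm ++ s) s (x - 1) else rhythm
termination_by x.toNat
decreasing_by omega

def euclid_str (pulses : Int) (steps : Int) : String :=
  let pulses := if pulses > steps then steps else pulses
  let a := "1"
  let b := "0"
  match euclidLoopA a b pulses (steps - pulses) with
  | (a, b, k, m) =>
    let rhythm := ""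
    let rhythm := repLoopA rhythm a k
    repLoopA rhythm b m

-- ===== PORT B =====
-- Python's  s * n  on strings (empty for n ≤ 0)
def strTimes (s : String) (n : Int) : String :=
  if h : 0 < n then s ++ strTimes s (n - 1) else ""
termination_by n.toNat
decreasing_by omega

-- B's recursive division-based descent; returns the finished rhythm directly
def descendB (a b : String) (k m : Int) : String :=
  if h : m > 1 ∧ k > 1 then
    if k ≤ m then
      descendB (a ++ strTimes b (PySem.Int.floordiv m k)) b k (PySem.Int.mod m k)
    else
      descendB (a ++ b) a m (k - m)
  else strTimes a k ++ strTimes b m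
termination_by (k + m).toNat
decreasing_by
  · have h1 : 0 ≤ PySem.Int.mod m k := PySem.Int.mod_nonneg m (by omega)
    have h2 : PySem.Int.mod m k < k := PySem.Int.mod_lt m (by omega)
    omega
  · omega

def euclid_str_alt (pulses : Int) (steps : Int) : String :=
  let p := if pulses > steps then steps else pulses
  descendB "1" "0" p (steps - p)

-- ===== PRECONDITION & SPEC =====
def Spec_euclid_str (pulses : Int) (steps : Int) (out : String) : Prop := out = euclid_str_alt pulses steps
instance (pulses : Int) (steps : Int) (out : String) : Decidable (Spec_euclid_str pulses steps out) := by unfold Spec_euclid_str; infer_instance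

-- ===== CLAIM (what is proved, stated in full; the proofs are below) =====
def Claim_equal_euclid_str : Prop := ∀ (pulses : Int) (steps : Int), Dom_euclid_str pulses steps → Spec_euclid_str pulses steps (euclid_str pulses steps)

-- ===== LEMMAS AND PROOFS =====

theorem strTimes_nonpos (s : String) (n : Int) (h : n ≤ 0) : strTimes s n = "" := by
  unfold strTimes; simp [show ¬ 0 < n by omega]

theorem strTimes_pos (s : String) (n : Int) (h : 0 < n) : strTimes s n = s ++ strTimes s (n - 1) := by
  rw [strTimes]; simp [h]

theorem strTimes_one (s : String) : strTimes s 1 = s := by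
  rw [strTimes_pos s 1 (by omega), show (1:Int) - 1 = 0 by omega,
    strTimes_nonpos s 0 le_rfl, String.append_empty]

-- A's output loop is string repetition
theorem repLoopA_eq (s : String) (x : Int) : ∀ rhythm, repLoopA rhythm s x = rhythm ++ strTimes s x := by
  by_cases h : 0 < x
  · intro rhythm
    rw [repLoopA, if_pos h, repLoopA_eq s (x - 1), strTimes_pos s x h, String.append_assoc]
  · intro rhythm
    rw [repLoopA, if_neg h, strTimes_nonpos s x (by omega), String.append_empty]
termination_by x.toNat
decreasing_by omega

-- batching A's subtractive branch: as long as 1 < k ≤ m, A keeps appending b and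
-- subtracting k, i.e. it performs a whole division in unit steps
theorem euclidLoopA_batch (k : Int) (hk : 1 < k) : ∀ (m : Int), k ≤ m → ∀ (a b : String),
    euclidLoopA a b k m
      = euclidLoopA (a ++ strTimes b (PySem.Int.floordiv m k)) b k (PySem.Int.mod m k) := by
  intro m hm a b
  have hk0 : (0:Int) < k := by omega
  rw [PySem.Int.floordiv_eq_ediv_of_pos hk0, PySem.Int.mod_eq_emod_of_pos hk0]
  rw [euclidLoopA, dif_pos (by omega), if_pos hm]
  by_cases h2 : k ≤ m - k
  · have ih := euclidLoopA_batch k hk (m - k) h2 (a ++ b) b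
    rw [PySem.Int.floordiv_eq_ediv_of_pos hk0, PySem.Int.mod_eq_emod_of_pos hk0] at ih
    rw [ih]
    have hdiv : (m - k) / k = m / k - 1 := by
      have := Int.add_mul_ediv_right m (-1) (show k ≠ 0 by omega)
      have hmk : m - k = m + (-1) * k := by ring
      rw [hmk, this]; ring
    have hmod : (m - k) % k = m % k := by
      have hmk : m - k = m + k * (-1) := by ring
      rw [hmk, Int.add_mul_emod_self_left]
    have hq : 0 < m / k := (Int.le_ediv_iff_mul_le hk0).mpr (by omega)
    rw [hdiv, hmod, strTimes_pos b (m / k) hq, ← String.append_assoc]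
  · -- one subtraction was the whole quotient: m / k = 1, m % k = m - k
    have hlt : m < 2 * k := by omega
    have hq : m / k = 1 := by
      have h1 : 1 ≤ m / k := (Int.le_ediv_iff_mul_le hk0).mpr (by omega)
      have h2' : m / k < 2 := (Int.ediv_lt_iff_lt_mul hk0).mpr (by omega)
      omega
    have hr : m % k = m - k := by
      have h1 : (m - k) % k = m % k := by
        have hmk : m - k = m + k * (-1) := by ring
        rw [hmk, Int.add_mul_emod_self_left]
      have h2' : (m - k) % k = m - k := Int.emod_eq_of_lt (by omega) (by omega)
      omega
    rw [hq, hr, strTimes_one]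
termination_by m => m.toNat
decreasing_by
  have h1 : 0 ≤ PySem.Int.mod m k := PySem.Int.mod_nonneg m (by omega)
  omega

-- main correspondence (fuel-indexed induction on the Euclidean measure k+m):
-- B's descent computes A's final loop state rendered as a string
theorem descendB_eqF (n : Nat) : ∀ (k m : Int), (k + m).toNat ≤ n → ∀ (a b : String),
    descendB a b k m
      = strTimes (euclidLoopA a b k m).1 (euclidLoopA a b k m).2.2.1
          ++ strTimes (euclidLoopA a b k m).2.1 (euclidLoopA a b k m).2.2.2 := by
  induction n with
  | zero =>
    intro k m hn a b
    have h : ¬(m > 1 ∧ k > 1) := by omega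
    rw [descendB, dif_neg h, euclidLoopA, dif_neg h]
  | succ n ih =>
    intro k m hn a b
    by_cases h : m > 1 ∧ k > 1
    · by_cases hkm : k ≤ m
      · have hmod1 : 0 ≤ PySem.Int.mod m k := PySem.Int.mod_nonneg m (by omega)
        have hmod2 : PySem.Int.mod m k < k := PySem.Int.mod_lt m (by omega)
        rw [euclidLoopA_batch k h.2 m hkm a b]
        rw [descendB, dif_pos h, if_pos hkm]
        exact ih k (PySem.Int.mod m k) (by omega) _ _
      · have step : euclidLoopA a b k m = euclidLoopA (a ++ b) a m (k - m) := by
          rw [euclidLoopA, dif_pos h, if_neg hkm]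
        rw [step, descendB, dif_pos h, if_neg hkm]
        exact ih m (k - m) (by omega) _ _
    · rw [descendB, dif_neg h, euclidLoopA, dif_neg h]

-- ===== VERDICT (by name: the statement is the Claim_ definition above) =====
theorem euclid_str_spec : Claim_equal_euclid_str := by
  intro pulses steps _
  unfold Spec_euclid_str euclid_str euclid_str_alt
  rw [descendB_eqF ((if pulses > steps then steps else pulses)
        + (steps - if pulses > steps then steps else pulses)).toNat _ _ le_rfl]
  simp only [repLoopA_eq, String.empty_append, String.append_assoc]
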